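-- pv_equiv track=rewrite | github.com/hrabovyiroman/Python | main.py | johns_savings
-- ===== SOURCE A (Python) =====
-- def johns_savings(N):
--     beginning_savings = 300
--     month_savings = 100
--     every_six_month_savings = 500
--
--     for month in range(1, N + 1):
--         beginning_savings += month_savings
--         if month % 6 == 0:
--             beginning_savings += every_six_month_savings
--     return beginning_savings
-- ===== SOURCE B (Python) =====
-- def johns_savings(N):
--     # Closed form: monthly deposits plus a bonus every sixth month; no months for N <= 0.
--     m = max(N, 0)
--     return 300 + 100 * m + 500 * (m // 6)
-- ===== Notes on version B (the rewrite author's own statement) =====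
-- stated objective: faster
-- what changed: Replaced the month-by-month accumulation loop with the closed form 300 + 100*max(N,0) + 500*(max(N,0)//6).
import Mathlib
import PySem

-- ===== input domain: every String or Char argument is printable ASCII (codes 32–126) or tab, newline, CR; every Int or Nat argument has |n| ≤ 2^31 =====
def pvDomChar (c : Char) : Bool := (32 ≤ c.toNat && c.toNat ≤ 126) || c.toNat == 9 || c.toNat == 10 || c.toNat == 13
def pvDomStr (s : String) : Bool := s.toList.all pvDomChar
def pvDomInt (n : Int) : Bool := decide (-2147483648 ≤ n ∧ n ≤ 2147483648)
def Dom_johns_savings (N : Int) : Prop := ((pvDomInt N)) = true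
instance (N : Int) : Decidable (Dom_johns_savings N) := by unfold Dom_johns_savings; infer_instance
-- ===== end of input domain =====

-- B replaces A's month-by-month loop with the closed form 300 + 100*max(N,0) + 500*(max(N,0)//6) (faster).

-- ===== PORT A =====
def johns_savings (N : Int) : Int :=
  (PySem.List.pyRange 1 (N + 1) 1).foldl
    (fun beginning_savings month =>
      let beginning_savings := beginning_savings + 100
      if PySem.Int.mod month 6 = 0 then beginning_savings + 500 else beginning_savings)
    300

-- ===== PORT B =====
def johns_savings_alt (N : Int) : Int :=
  let m := max N 0
  300 + 100 * m + 500 * PySem.Int.floordiv m 6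

-- ===== PRECONDITION & SPEC =====
def Spec_johns_savings (N : Int) (out : Int) : Prop := out = johns_savings_alt N
instance (N : Int) (out : Int) : Decidable (Spec_johns_savings N out) := by unfold Spec_johns_savings; infer_instance

-- ===== CLAIM (what is proved, stated in full; the proofs are below) =====
def Claim_equal_johns_savings : Prop := ∀ (N : Int), Dom_johns_savings N → Spec_johns_savings N (johns_savings N)

-- ===== LEMMAS AND PROOFS =====

-- A's loop on a natural number of months, in closed form
theorem johns_nat (n : Nat) :
    johns_savings (n : Int) = 300 + 100 * (n : Int) + 500 * ((n / 6 : Nat) : Int) := by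
  induction n with
  | zero =>
    norm_num [johns_savings, PySem.List.pyRange_one]
  | succ n ih =>
    unfold johns_savings at ih ⊢
    have hb : ((n + 1 : Nat) : Int) + 1 = ((n : Int) + 1) + 1 := by push_cast; ring
    rw [hb, PySem.List.pyRange_one_succ_right (by omega), List.foldl_append, ih]
    simp only [List.foldl_cons, List.foldl_nil]
    have hmod : PySem.Int.mod ((n : Int) + 1) 6 = (((n : Int) + 1) % 6) :=
      PySem.Int.mod_eq_emod_of_pos (by norm_num)
    rw [hmod]
    by_cases h : ((n : Int) + 1) % 6 = 0
    · have h2 : (((n + 1 : Nat) / 6 : Nat) : Int) = ((n / 6 : Nat) : Int) + 1 := by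
        have : (n + 1) / 6 = n / 6 + 1 := by omega
        rw [this]; push_cast; ring
      rw [if_pos h, h2]; push_cast; ring
    · have h2 : (((n + 1 : Nat) / 6 : Nat) : Int) = ((n / 6 : Nat) : Int) := by
        have : (n + 1) / 6 = n / 6 := by omega
        rw [this]
      rw [if_neg h, h2]; push_cast; ring

-- ===== VERDICT (by name: the statement is the Claim_ definition above) =====
theorem johns_savings_spec : Claim_equal_johns_savings := by
  intro N _
  unfold Spec_johns_savings
  by_cases hle : N ≤ 0
  · have h0 : (N + 1 - 1).toNat = 0 := by omega
    unfold johns_savings johns_savings_alt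
    rw [PySem.List.pyRange_one, h0]
    simp [max_eq_right hle, PySem.Int.floordiv]
  · have hpos : 0 ≤ N := by omega
    have hN : (N.toNat : Int) = N := Int.toNat_of_nonneg hpos
    rw [← hN, johns_nat]
    unfold johns_savings_alt
    have hm : max ((N.toNat : Int)) 0 = (N.toNat : Int) := by omega
    rw [hm]
    show 300 + 100 * ((N.toNat : Int)) + 500 * (((N.toNat / 6 : Nat)) : Int)
        = 300 + 100 * ((N.toNat : Int)) + 500 * PySem.Int.floordiv ((N.toNat : Int)) 6
    have hdiv : PySem.Int.floordiv ((N.toNat : Int)) 6 = (N.toNat : Int) / 6 :=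
      PySem.Int.floordiv_eq_ediv_of_pos (by norm_num)
    rw [hdiv, Int.natCast_div]
    norm_num
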